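-- pv_equiv track=rewrite | github.com/luhego/advent-of-code-2022 | day6/tuning-trouble.py | detect_marker
-- ===== SOURCE A (Python) =====
-- from collections import defaultdict
--
-- def detect_marker(message, number_of_distinct_letters=4):
--     freqs = defaultdict(int)
--
--     start = 0
--     for end, _ in enumerate(message):
--         freqs[message[end]] += 1
--
--         while freqs[message[end]] > 1:
--             freqs[message[start]] -= 1
--             if freqs[message[start]] == 0:
--                 del freqs[message[start]]
--             start += 1
--
--         if len(freqs) == number_of_distinct_letters:
--             return end + 1
-- ===== SOURCE B (Python) =====
-- def detect_marker(message, number_of_distinct_letters=4):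
--     n = number_of_distinct_letters
--     for i in range(len(message)):
--         window = message[i:i+n]
--         if len(window) == len(set(window)) == n:
--             return i + n
--     return None
-- ===== Notes on version B (the rewrite author's own statement) =====
-- stated objective: simpler
-- what changed: Replaces the incremental two-pointer frequency-map sliding window with a brute-force scan over start positions that re-checks each candidate window independently via len(window) == len(set(window)) == n.
-- outside the precondition, e.g. on detect_marker('ab', 0): A returns None, B returns 0
import Mathlib
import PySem

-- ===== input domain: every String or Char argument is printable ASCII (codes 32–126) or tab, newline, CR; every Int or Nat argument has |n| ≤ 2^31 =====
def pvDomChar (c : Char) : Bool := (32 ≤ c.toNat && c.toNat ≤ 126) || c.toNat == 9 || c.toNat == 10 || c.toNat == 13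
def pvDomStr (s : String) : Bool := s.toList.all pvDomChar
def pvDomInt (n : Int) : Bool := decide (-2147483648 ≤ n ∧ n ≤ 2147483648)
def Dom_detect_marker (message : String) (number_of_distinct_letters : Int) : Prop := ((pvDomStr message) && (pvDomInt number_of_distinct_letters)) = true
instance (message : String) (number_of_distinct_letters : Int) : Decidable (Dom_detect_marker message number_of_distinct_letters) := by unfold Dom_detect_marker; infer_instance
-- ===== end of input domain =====

-- B replaces A's incremental two-pointer frequency-map sliding window by a brute-force
-- re-scan of each candidate window (objective: simpler; not faster).

-- ===== PORT A =====
-- inner 'while freqs[message[end]] > 1: …' loop; the fuel (= end+1 at the call) only makes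
-- the recursion structural: the Python loop always stops within end - start ≤ fuel steps
def pvShrinkA (msg : List Char) (c : Char) (fuel : Nat)
    (freqs : PySem.Dict Char Int) (start : Nat) : PySem.Dict Char Int × Nat :=
  match fuel with
  | 0 => (freqs, start)
  | fuel + 1 =>
    if freqs.getD c 0 > 1 then
      let cs := msg.getD start ' '
      let f2 := freqs.insert cs (freqs.getD cs 0 - 1)
      let f3 := if f2.getD cs 0 = 0 then f2.erase cs else f2
      pvShrinkA msg c fuel f3 (start + 1)
    else (freqs, start)

-- outer 'for end, _ in enumerate(message)' loop, one call per index e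
def pvLoopA (msg : List Char) (n : Int)
    (freqs : PySem.Dict Char Int) (start e : Nat) : Option Int :=
  if _h : e < msg.length then
    let c := msg.getD e ' '
    let f1 := freqs.insert c (freqs.getD c 0 + 1)
    let p := pvShrinkA msg c (e + 1) f1 start
    if (p.1.size : Int) = n then some ((e : Int) + 1)
    else pvLoopA msg n p.1 p.2 (e + 1)
  else none
termination_by msg.length - e

def detect_marker (message : String) (number_of_distinct_letters : Int) : Option Int :=
  pvLoopA message.toList number_of_distinct_letters PySem.Dict.empty 0 0

-- ===== PORT B =====
-- for i in range(len(message)): window = message[i:i+n];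
--   if len(window) == len(set(window)) == n: return i + n
def detect_marker_alt (message : String) (number_of_distinct_letters : Int) : Option Int :=
  let msg := message.toList
  let n := number_of_distinct_letters
  (PySem.List.pyRange 0 (msg.length : Int)).findSome? (fun i =>
    let window := PySem.List.slice msg (some i) (some (i + n))
    if window.length = (PySem.Set.ofList window).length ∧
        ((PySem.Set.ofList window).length : Int) = n
    then some (i + n) else none)

-- ===== PRECONDITION & SPEC =====
-- Pre_ excludes only number_of_distinct_letters = 0, a degenerate corner on which both
-- behaviours are defensible and unspecified: A never checks the empty window and returns
-- None, B accepts the vacuously distinct empty window at position 0 and returns 0.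
def Pre_detect_marker (message : String) (number_of_distinct_letters : Int) : Prop :=
  number_of_distinct_letters ≠ 0
instance (message : String) (number_of_distinct_letters : Int) : Decidable (Pre_detect_marker message number_of_distinct_letters) := by unfold Pre_detect_marker; infer_instance
def pvWitness_detect_marker : String × Int := ("mjqjpqmgbljsphdztnvjfqwrcgsmlb", 4)

def Spec_detect_marker (message : String) (number_of_distinct_letters : Int) (out : Option Int) : Prop := out = detect_marker_alt message number_of_distinct_letters
instance (message : String) (number_of_distinct_letters : Int) (out : Option Int) : Decidable (Spec_detect_marker message number_of_distinct_letters out) := by unfold Spec_detect_marker; infer_instance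

-- ===== CLAIM (what is proved, stated in full; the proofs are below) =====
def Claim_equal_detect_marker : Prop := ∀ (message : String) (number_of_distinct_letters : Int), Dom_detect_marker message number_of_distinct_letters → Pre_detect_marker message number_of_distinct_letters → Spec_detect_marker message number_of_distinct_letters (detect_marker message number_of_distinct_letters)

-- ===== LEMMAS AND PROOFS =====

-- the window message[j:k]
def pvWin (msg : List Char) (j k : Nat) : List Char := (msg.drop j).take (k - j)

-- common specification of both programs (for n ≥ 1): the first j ≥ j0 with j + m ≤ len
-- whose window msg[j:j+m] is duplicate-free, returning j + m
def pvFirstOk (msg : List Char) (m : Nat) (j : Nat) : Option Int :=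
  if j + m ≤ msg.length then
    if (pvWin msg j (j + m)).Nodup then some ((j : Int) + (m : Int))
    else pvFirstOk msg m (j + 1)
  else none
termination_by msg.length + 1 - j
decreasing_by omega

-- ---- window facts ----
theorem pvWin_length (msg : List Char) (j k : Nat) (hk : k ≤ msg.length) :
    (pvWin msg j k).length = k - j := by
  simp [pvWin]; omega

theorem pvWin_cons (msg : List Char) (j k : Nat) (hj : j < k) (hl : j < msg.length) :
    pvWin msg j k = msg.getD j ' ' :: pvWin msg (j + 1) k := by
  unfold pvWin
  rw [show k - j = (k - (j + 1)) + 1 by omega, List.drop_eq_getElem_cons hl,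
    List.take_succ_cons]
  simp [List.getD, hl]

theorem pvWin_snoc (msg : List Char) (j k : Nat) (hjk : j ≤ k) (hk : k < msg.length) :
    pvWin msg j (k + 1) = pvWin msg j k ++ [msg.getD k ' '] := by
  unfold pvWin
  rw [show k + 1 - j = (k - j) + 1 by omega, List.take_succ]
  congr 1
  rw [List.getElem?_drop, show j + (k - j) = k by omega]
  simp [List.getD, hk]

theorem pvWin_nodup_of_succ (msg : List Char) (j k : Nat) (hjk : j ≤ k) (hk : k < msg.length)
    (h : (pvWin msg j (k + 1)).Nodup) : (pvWin msg j k).Nodup := by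
  rw [pvWin_snoc msg j k hjk hk] at h
  exact h.of_append_left

-- ---- Dict.erase facts (not in the PySem lemma book) ----
theorem pv_get?_erase {ν : Type} (d : PySem.Dict Char ν) (k k' : Char) :
    (d.erase k).get? k' = if k' = k then none else d.get? k' := by
  obtain ⟨items⟩ := d
  induction items with
  | nil => simp [PySem.Dict.erase, PySem.Dict.get?]
  | cons p rest ih =>
    by_cases h1 : p.1 = k
    · rw [show (PySem.Dict.mk (p :: rest)).erase k = (PySem.Dict.mk rest).erase k by
        simp [PySem.Dict.erase, h1]]
      rw [ih]
      by_cases h2 : k' = k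
      · simp [h2]
      · have hp : (p.1 == k') = false := by simp [h1]; exact fun h => h2 h.symm
        simp [h2, PySem.Dict.get?, hp]
    · rw [show (PySem.Dict.mk (p :: rest)).erase k
          = PySem.Dict.mk (p :: ((PySem.Dict.mk rest).erase k).items) by
        simp [PySem.Dict.erase, h1]]
      by_cases h2 : p.1 = k'
      · have : ¬ k' = k := fun h => h1 (h ▸ h2)
        simp [PySem.Dict.get?, h2, this]
      · have hp : (p.1 == k') = false := by simp [h2]
        simp only [PySem.Dict.get?, List.find?_cons, hp]
        exact ih

theorem pv_getD_erase (d : PySem.Dict Char Int) (k k' : Char) (v : Int) :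
    (d.erase k).getD k' v = if k' = k then v else d.getD k' v := by
  simp [PySem.Dict.getD, pv_get?_erase]
  split <;> rfl

theorem pv_contains_erase {ν : Type} (d : PySem.Dict Char ν) (k k' : Char) :
    (d.erase k).contains k' = (decide (k' ≠ k) && d.contains k') := by
  rw [PySem.Dict.contains_eq_isSome_get?, PySem.Dict.contains_eq_isSome_get?,
    pv_get?_erase]
  by_cases h : k' = k <;> simp [h]

theorem pv_nodup_keys_erase {ν : Type} (d : PySem.Dict Char ν) (k : Char)
    (h : d.keys.Nodup) : (d.erase k).keys.Nodup := by
  have : (d.erase k).keys.Sublist d.keys := by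
    simp only [PySem.Dict.keys, PySem.Dict.erase]
    exact List.Sublist.map _ List.filter_sublist
  exact this.nodup h

-- ---- the loop invariant of A: freqs is the frequency map of the window msg[j:k] ----
def pvInv (msg : List Char) (freqs : PySem.Dict Char Int) (j k : Nat) : Prop :=
  (∀ c, freqs.getD c 0 = ((pvWin msg j k).count c : Int)) ∧
  (∀ c, freqs.contains c = true ↔ c ∈ pvWin msg j k) ∧
  freqs.keys.Nodup

theorem pvWin_nil (msg : List Char) (j : Nat) : pvWin msg j j = [] := by
  simp [pvWin]

theorem pvShrinkA_spec (msg : List Char) (e : Nat) (he : e < msg.length) :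
    ∀ fuel start freqs, start ≤ e → e - start < fuel →
    pvInv msg freqs start (e + 1) → (pvWin msg start e).Nodup →
    start ≤ (pvShrinkA msg (msg.getD e ' ') fuel freqs start).2 ∧
    (pvShrinkA msg (msg.getD e ' ') fuel freqs start).2 ≤ e ∧
    pvInv msg (pvShrinkA msg (msg.getD e ' ') fuel freqs start).1
      (pvShrinkA msg (msg.getD e ' ') fuel freqs start).2 (e + 1) ∧
    (pvWin msg (pvShrinkA msg (msg.getD e ' ') fuel freqs start).2 (e + 1)).Nodup ∧
    (∀ j, start ≤ j → j < (pvShrinkA msg (msg.getD e ' ') fuel freqs start).2 →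
      ¬ (pvWin msg j (e + 1)).Nodup) := by
  intro fuel
  induction fuel with
  | zero => intro start freqs hse hfuel _ _; omega
  | succ fuel ih =>
    intro start freqs hse hfuel hinv hWnod
    obtain ⟨hgd, hct, hkd⟩ := hinv
    have hVsnoc : pvWin msg start (e + 1) = pvWin msg start e ++ [msg.getD e ' '] :=
      pvWin_snoc msg start e hse he
    by_cases hcond : freqs.getD (msg.getD e ' ') 0 > 1
    · -- while-loop body runs once
      have hcnt : ((pvWin msg start (e + 1)).count (msg.getD e ' ') : Int)
          = freqs.getD (msg.getD e ' ') 0 := (hgd _).symm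
      have hcV : 1 < (pvWin msg start (e + 1)).count (msg.getD e ' ') := by omega
      have hcW : 1 ≤ (pvWin msg start e).count (msg.getD e ' ') := by
        rw [hVsnoc, List.count_append, List.count_singleton] at hcV
        simp only [beq_self_eq_true, if_true] at hcV
        omega
      have hlt : start < e := by
        rcases Nat.lt_or_ge start e with h | h
        · exact h
        · exfalso
          have : start = e := by omega
          rw [this, pvWin_nil] at hcW
          simp at hcW
      -- window head
      have hVcons : pvWin msg start (e + 1)
          = msg.getD start ' ' :: pvWin msg (start + 1) (e + 1) :=
        pvWin_cons msg start (e + 1) (by omega) (by omega)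
      have hWcons : pvWin msg start e = msg.getD start ' ' :: pvWin msg (start + 1) e :=
        pvWin_cons msg start e hlt (by omega)
      -- counts of the shrunk window
      have hcnt' : ∀ a, ((pvWin msg (start + 1) (e + 1)).count a : Int)
          = (pvWin msg start (e + 1)).count a - (if msg.getD start ' ' = a then 1 else 0) := by
        intro a
        rw [hVcons, List.count_cons]
        simp only [beq_iff_eq]
        split <;> push_cast <;> omega
      -- the updated dict
      set cs := msg.getD start ' ' with hcs
      set f2 := freqs.insert cs (freqs.getD cs 0 - 1) with hf2
      have hgf2 : ∀ a, f2.getD a 0 = ((pvWin msg (start + 1) (e + 1)).count a : Int) := by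
        intro a
        rw [hf2, PySem.Dict.getD_insert]
        split
        · next hac =>
          rw [hac, hcnt' cs, hgd cs]; simp
        · next hac =>
          rw [hcnt' a, hgd a]
          have : ¬ (cs = a) := fun h => hac h.symm
          simp [this]
      have hcf2 : ∀ a, f2.contains a = true ↔ (a = cs ∨ a ∈ pvWin msg start (e + 1)) := by
        intro a
        rw [hf2, PySem.Dict.contains_insert]
        constructor
        · intro h
          rcases Bool.or_eq_true_iff.mp h with h | h
          · exact Or.inl (by simpa using h)
          · exact Or.inr ((hct a).mp h)
        · intro h
          rcases h with h | h
          · simp [h]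
          · simp [(hct a).mpr h]
      have hmemV : ∀ a, a ∈ pvWin msg start (e + 1) ↔ (a = cs ∨ a ∈ pvWin msg (start + 1) (e + 1)) := by
        intro a
        rw [hVcons]
        simp
      -- the invariant after this iteration, for both the erase and non-erase branch
      have hinv' : pvInv msg (if f2.getD cs 0 = 0 then f2.erase cs else f2) (start + 1) (e + 1) := by
        by_cases hz : f2.getD cs 0 = 0
        · have hnm : cs ∉ pvWin msg (start + 1) (e + 1) := by
            intro hmem
            have := hgf2 cs
            rw [hz] at this
            have hpos : 0 < (pvWin msg (start + 1) (e + 1)).count cs :=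
              List.count_pos_iff.mpr hmem
            omega
          rw [if_pos hz]
          refine ⟨?_, ?_, pv_nodup_keys_erase _ _ (PySem.Dict.nodup_keys_insert _ _ _ hkd)⟩
          · intro a
            rw [pv_getD_erase]
            split
            · next hac =>
              subst hac
              have : (pvWin msg (start + 1) (e + 1)).count cs = 0 :=
                List.count_eq_zero.mpr hnm
              rw [this]; simp
            · exact hgf2 a
          · intro a
            rw [pv_contains_erase]
            by_cases hac : a = cs
            · simp [hac, hnm]
            · simp only [hac, ne_eq, not_false_eq_true, decide_true, Bool.true_and]
              rw [hcf2 a]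
              rw [hmemV a]
              simp [hac]
        · have hnm : cs ∈ pvWin msg (start + 1) (e + 1) := by
            have := hgf2 cs
            rcases Nat.eq_zero_or_pos ((pvWin msg (start + 1) (e + 1)).count cs) with h | h
            · exfalso; rw [h] at this; simp at this; omega
            · exact List.count_pos_iff.mp h
          rw [if_neg hz]
          refine ⟨hgf2, ?_, PySem.Dict.nodup_keys_insert _ _ _ hkd⟩
          intro a
          rw [hcf2 a, hmemV a]
          by_cases hac : a = cs <;> simp [hac, hnm]
      -- the tail window (ending at e) stays duplicate-free
      have hWnod' : (pvWin msg (start + 1) e).Nodup := by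
        rw [hWcons] at hWnod
        exact hWnod.of_cons
      -- this iteration's start is not a valid answer
      have hbad : ¬ (pvWin msg start (e + 1)).Nodup := by
        intro hnd
        have := (List.nodup_iff_count_le_one.mp hnd) (msg.getD e ' ')
        omega
      -- unfold one step of pvShrinkA
      have hstep : pvShrinkA msg (msg.getD e ' ') (fuel + 1) freqs start
          = pvShrinkA msg (msg.getD e ' ') fuel
              (if f2.getD cs 0 = 0 then f2.erase cs else f2) (start + 1) := by
        conv_lhs => rw [pvShrinkA]
        rw [if_pos hcond]
      rw [hstep]
      obtain ⟨ih1, ih2, ih3, ih4, ih5⟩ := ih (start + 1) _ hlt (by omega) hinv' hWnod'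
      refine ⟨by omega, ih2, ih3, ih4, ?_⟩
      intro j hj1 hj2
      rcases Nat.eq_or_lt_of_le hj1 with h | h
      · rw [← h]; exact hbad
      · exact ih5 j h hj2
    · -- while-loop exits: the whole window is duplicate-free
      have hstep : pvShrinkA msg (msg.getD e ' ') (fuel + 1) freqs start = (freqs, start) := by
        conv_lhs => rw [pvShrinkA]
        rw [if_neg hcond]
      rw [hstep]
      have hnod : (pvWin msg start (e + 1)).Nodup := by
        rw [List.nodup_iff_count_le_one]
        intro a
        by_cases hac : a = msg.getD e ' '
        · rw [hac]
          have := hgd (msg.getD e ' ')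
          omega
        · rw [hVsnoc, List.count_append, List.count_singleton]
          have h1 := (List.nodup_iff_count_le_one.mp hWnod) a
          have hf : (msg.getD e ' ' == a) = false := by
            rw [beq_eq_false_iff_ne]
            exact fun h => hac h.symm
          rw [hf]
          simp
          omega
      exact ⟨le_refl _, hse, ⟨hgd, hct, hkd⟩, hnod, fun j h1 h2 => by omega⟩

theorem pvLoopA_aux (msg : List Char) (n : Int) (m : Nat) (hm : n = (m : Int)) (hm1 : 1 ≤ m) :
    ∀ k e freqs start, msg.length - e ≤ k → start ≤ e → e ≤ msg.length →
    pvInv msg freqs start e → (pvWin msg start e).Nodup → e - start < m →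
    (∀ j, j < start → ¬ (pvWin msg j e).Nodup) →
    pvLoopA msg n freqs start e = pvFirstOk msg m (e + 1 - m) := by
  intro k
  induction k with
  | zero =>
    intro e freqs start hk hse hel _ _ _ _
    have he : e = msg.length := by omega
    rw [pvLoopA, dif_neg (by omega), pvFirstOk, if_neg (by omega)]
  | succ k ih =>
    intro e freqs start hk hse hel hinv hWnod hlt hmin
    by_cases he : e < msg.length
    · -- one iteration of the for loop
      have hc : msg.getD e ' ' = msg.getD e ' ' := rfl
      -- the invariant after freqs[message[end]] += 1
      have hinv1 : pvInv msg (freqs.insert (msg.getD e ' ')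
          (freqs.getD (msg.getD e ' ') 0 + 1)) start (e + 1) := by
        obtain ⟨hgd, hct, hkd⟩ := hinv
        have hVsnoc : pvWin msg start (e + 1) = pvWin msg start e ++ [msg.getD e ' '] :=
          pvWin_snoc msg start e hse he
        refine ⟨?_, ?_, PySem.Dict.nodup_keys_insert _ _ _ hkd⟩
        · intro a
          rw [PySem.Dict.getD_insert, hVsnoc, List.count_append, List.count_singleton]
          split
          · next hac =>
            rw [hac, hgd (msg.getD e ' ')]
            simp
          · next hac =>
            rw [hgd a]
            have hf : (msg.getD e ' ' == a) = false := by
              rw [beq_eq_false_iff_ne]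
              exact fun h => hac h.symm
            rw [hf]
            simp
        · intro a
          rw [PySem.Dict.contains_insert, hVsnoc]
          rw [Bool.or_eq_true_iff, beq_iff_eq]
          rw [List.mem_append, List.mem_singleton]
          rw [hct a]
          tauto
      obtain ⟨hs1, hs2, hinv2, hnod2, hmin2⟩ :=
        pvShrinkA_spec msg e he (e + 1) start _ hse (by omega) hinv1 hWnod
      set p := pvShrinkA msg (msg.getD e ' ') (e + 1)
        (freqs.insert (msg.getD e ' ') (freqs.getD (msg.getD e ' ') 0 + 1)) start with hp
      -- size of the dict = length of the (duplicate-free) current window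
      have hsize : p.1.size = (e + 1) - p.2 := by
        obtain ⟨hgd2, hct2, hkd2⟩ := hinv2
        have hkeys : ∀ a, a ∈ p.1.keys ↔ a ∈ pvWin msg p.2 (e + 1) := by
          intro a
          rw [← PySem.Dict.contains_iff_mem_keys, hct2 a]
        have hperm : List.Perm p.1.keys (pvWin msg p.2 (e + 1)) :=
          (List.perm_ext_iff_of_nodup hkd2 hnod2).mpr hkeys
        have hlen : p.1.keys.length = (e + 1) - p.2 := by
          rw [hperm.length_eq, pvWin_length msg p.2 (e + 1) (by omega)]
        rw [← hlen]
        simp [PySem.Dict.size, PySem.Dict.keys]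
      -- the minimality of the new start, extended to windows ending at e+1
      have hmin' : ∀ j, j < p.2 → ¬ (pvWin msg j (e + 1)).Nodup := by
        intro j hj hnd
        rcases Nat.lt_or_ge j start with hjs | hjs
        · exact hmin j hjs (pvWin_nodup_of_succ msg j e (by omega) he hnd)
        · exact hmin2 j hjs hj hnd
      -- unfold one step of pvLoopA
      rw [pvLoopA, dif_pos he]
      simp only [← hp]
      by_cases hret : (p.1.size : Int) = n
      · rw [if_pos hret]
        have hsz : (e + 1) - p.2 = m := by
          rw [hm] at hret
          omega
        have hp2 : p.2 = e + 1 - m := by omega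
        rw [pvFirstOk, if_pos (by omega)]
        rw [show e + 1 - m + m = e + 1 by omega, ← hp2]
        rw [if_pos hnod2]
        congr 1
        omega
      · rw [if_neg hret]
        have hszlt : (e + 1) - p.2 < m := by
          rw [hm] at hret
          have h1 : (e + 1) - p.2 ≤ m := by omega
          have h2 : (e + 1) - p.2 ≠ m := fun h => hret (by rw [hsize, h])
          omega
        rw [ih (e + 1) p.1 p.2 (by omega) (by omega) (by omega) hinv2 hnod2 (by omega) hmin']
        -- pvFirstOk skips the (duplicate-carrying or nonexistent) window at e+1-m
        rcases Nat.lt_or_ge e (m - 1) with hsmall | hbig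
        · rw [show e + 1 - m = 0 by omega, show e + 1 + 1 - m = 0 by omega]
        · have hj0 : e + 1 - m + m = e + 1 := by omega
          conv_rhs => rw [pvFirstOk]
          rw [if_pos (by omega), hj0]
          have hnnod : ¬ (pvWin msg (e + 1 - m) (e + 1)).Nodup := by
            apply hmin'
            omega
          rw [if_neg hnnod, show e + 1 - m + 1 = e + 1 + 1 - m by omega]
    · have he' : e = msg.length := by omega
      rw [pvLoopA, dif_neg (by omega), pvFirstOk, if_neg (by omega)]

theorem pv_setlen_eq_iff (w : List Char) :
    (PySem.Set.ofList w).length = w.length ↔ w.Nodup := by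
  constructor
  · intro h
    have hperm : List.Perm (PySem.Set.ofList w) w.dedup := by
      rw [List.perm_ext_iff_of_nodup (PySem.Set.nodup_ofList w) (List.nodup_dedup w)]
      intro a
      rw [PySem.Set.mem_ofList, List.mem_dedup]
    have hl : w.dedup.length = w.length := by
      rw [← hperm.length_eq, h]
    have hd : w.dedup = w := (List.dedup_sublist w).eq_of_length hl
    exact hd ▸ List.nodup_dedup w
  · intro h
    rw [PySem.Set.ofList_eq_self_of_nodup w h]

theorem pvLoopB_aux (msg : List Char) (n : Int) (m : Nat) (hm : n = (m : Int)) (hm1 : 1 ≤ m) :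
    ∀ k j, msg.length - j ≤ k →
    (PySem.List.pyRange (j : Int) (msg.length : Int)).findSome? (fun i =>
      let window := PySem.List.slice msg (some i) (some (i + n))
      if window.length = (PySem.Set.ofList window).length ∧
          ((PySem.Set.ofList window).length : Int) = n
      then some (i + n) else none) = pvFirstOk msg m j := by
  intro k
  induction k with
  | zero =>
    intro j hk
    rw [PySem.List.pyRange_one_eq_nil (by omega)]
    rw [pvFirstOk, if_neg (by omega)]
    rfl
  | succ k ih =>
    intro j hk
    by_cases hj : j < msg.length
    · rw [PySem.List.pyRange_one_cons (by omega)]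
      rw [List.findSome?_cons]
      have hslice : PySem.List.slice msg (some (j : Int)) (some ((j : Int) + n))
          = pvWin msg j (j + m) := by
        rw [hm, show (j : Int) + (m : Int) = ((j + m : Nat) : Int) by push_cast; ring]
        rw [PySem.List.slice_natCast]
        rfl
      by_cases hrange : j + m ≤ msg.length
      · have hwlen : (pvWin msg j (j + m)).length = m := by
          rw [pvWin_length msg j (j + m) hrange]; omega
        have hcond : ((pvWin msg j (j + m)).length
              = (PySem.Set.ofList (pvWin msg j (j + m))).length ∧
            ((PySem.Set.ofList (pvWin msg j (j + m))).length : Int) = n)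
            ↔ (pvWin msg j (j + m)).Nodup := by
          constructor
          · intro h
            exact (pv_setlen_eq_iff _).mp h.1.symm
          · intro h
            have he : (PySem.Set.ofList (pvWin msg j (j + m))).length
                = (pvWin msg j (j + m)).length := (pv_setlen_eq_iff _).mpr h
            refine ⟨he.symm, ?_⟩
            rw [he, hwlen, hm]
        by_cases hnod : (pvWin msg j (j + m)).Nodup
        · simp only [hslice]
          rw [if_pos (hcond.mpr hnod)]
          rw [pvFirstOk, if_pos hrange, if_pos hnod, hm]
        · simp only [hslice]
          rw [if_neg (fun h => hnod (hcond.mp h))]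
          rw [show ((j : Int) + 1) = (((j + 1 : Nat)) : Int) by push_cast; ring]
          rw [ih (j + 1) (by omega)]
          conv_rhs => rw [pvFirstOk]
          rw [if_pos hrange, if_neg hnod]
      · -- the window is shorter than n: the chained comparison fails
        have hwlen : (pvWin msg j (j + m)).length < m := by
          simp only [pvWin, List.length_take, List.length_drop]
          omega
        have hle : (PySem.Set.ofList (pvWin msg j (j + m))).length
            ≤ (pvWin msg j (j + m)).length := PySem.Set.length_ofList_le _
        simp only [hslice]
        rw [if_neg (by
          intro h
          have : (PySem.Set.ofList (pvWin msg j (j + m))).length = m := by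
            rw [hm] at h
            exact_mod_cast h.2
          omega)]
        rw [show ((j : Int) + 1) = (((j + 1 : Nat)) : Int) by push_cast; ring]
        rw [ih (j + 1) (by omega)]
        rw [pvFirstOk, if_neg (by omega)]
        rw [pvFirstOk, if_neg (by omega)]
    · rw [PySem.List.pyRange_one_eq_nil (by omega)]
      rw [pvFirstOk, if_neg (by omega)]
      rfl

-- the inner-loop lemma under the names used by the final proof
theorem pvLoopA_spec (msg : List Char) (n : Int) (m : Nat) (hm : n = (m : Int)) (hm1 : 1 ≤ m) :
    ∀ e freqs start, start ≤ e → e ≤ msg.length →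
    pvInv msg freqs start e → (pvWin msg start e).Nodup → e - start < m →
    (∀ j, j < start → ¬ (pvWin msg j e).Nodup) →
    pvLoopA msg n freqs start e = pvFirstOk msg m (e + 1 - m) := by
  intro e freqs start hse hel hinv hnod hlt hmin
  exact pvLoopA_aux msg n m hm hm1 msg.length e freqs start (by omega) hse hel hinv hnod hlt hmin

theorem pvLoopB_spec (msg : List Char) (n : Int) (m : Nat) (hm : n = (m : Int)) (hm1 : 1 ≤ m) :
    ∀ j : Nat,
    (PySem.List.pyRange (j : Int) (msg.length : Int)).findSome? (fun i =>
      let window := PySem.List.slice msg (some i) (some (i + n))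
      if window.length = (PySem.Set.ofList window).length ∧
          ((PySem.Set.ofList window).length : Int) = n
      then some (i + n) else none) = pvFirstOk msg m j := by
  intro j
  exact pvLoopB_aux msg n m hm hm1 msg.length j (by omega)

-- A returns none when n < 0 (the dict size, a Nat, never equals n)
theorem pvLoopA_neg_aux (msg : List Char) (n : Int) (hn : n < 0) :
    ∀ k e freqs start, msg.length - e ≤ k → pvLoopA msg n freqs start e = none := by
  intro k
  induction k with
  | zero =>
    intro e freqs start hk
    unfold pvLoopA
    rw [dif_neg (by omega)]
  | succ k ih =>
    intro e freqs start hk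
    unfold pvLoopA
    split
    · next h =>
      rw [if_neg (by intro hc; omega)]
      exact ih (e + 1) _ _ (by omega)
    · rfl

theorem pvLoopA_neg (msg : List Char) (n : Int) (hn : n < 0) :
    ∀ e freqs start, pvLoopA msg n freqs start e = none := by
  intro e freqs start
  exact pvLoopA_neg_aux msg n hn msg.length e freqs start (by omega)

-- B returns none when n < 0 (no set has negative size)
theorem pvB_neg (message : String) (n : Int) (hn : n < 0) :
    detect_marker_alt message n = none := by
  unfold detect_marker_alt
  rw [List.findSome?_eq_none_iff]
  intro i _
  have h2 : ¬ (((PySem.Set.ofList (PySem.List.slice message.toList (some i) (some (i + n)))).length : Int) = n) := by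
    intro hc
    omega
  simp only []
  rw [if_neg (fun h => h2 h.2)]

-- ===== VERDICT (by name: the statement is the Claim_ definition above) =====
theorem detect_marker_spec : Claim_equal_detect_marker := by
  intro message n _hdom hpre
  unfold Spec_detect_marker
  rcases lt_trichotomy n 0 with hn | hn | hn
  · rw [pvB_neg message n hn]
    unfold detect_marker
    exact pvLoopA_neg message.toList n hn 0 PySem.Dict.empty 0
  · exact absurd hn hpre
  · -- n ≥ 1
    obtain ⟨m, rfl⟩ : ∃ m : Nat, n = (m : Int) := ⟨n.toNat, (Int.toNat_of_nonneg hn.le).symm⟩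
    have hm1 : 1 ≤ m := by exact_mod_cast hn
    unfold detect_marker detect_marker_alt
    have hB := pvLoopB_spec message.toList (m : Int) m rfl hm1 0
    simp only [Int.natCast_zero] at hB
    rw [hB]
    have hA := pvLoopA_spec message.toList (m : Int) m rfl hm1 0 PySem.Dict.empty 0
      (le_refl 0) (Nat.zero_le _) ?_ ?_ (by omega) (by omega)
    · rw [hA]
      congr 1
      omega
    · refine ⟨?_, ?_, ?_⟩ <;>
        simp [pvWin, PySem.Dict.empty, PySem.Dict.getD, PySem.Dict.get?,
          PySem.Dict.contains, PySem.Dict.keys]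
    · simp [pvWin]
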